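-- pv_equiv track=rewrite | github.com/naveenprolific/python | brackets.py | f
-- ===== SOURCE A (Python) =====
-- def f(s):
-- 	b,mb=0,0
-- 	for i in range(len(s)):
-- 		if s[i]=='(':
-- 			b+=1
-- 		if s[i]==')':
-- 			b-=1
-- 		mb=max(mb,b)
-- 	return mb
-- ===== SOURCE B (Python) =====
-- def f(s):
--     # Back-to-front scan: peak = max prefix-balance of the suffix already seen
--     # (including the empty prefix), so the final value is the answer for s.
--     peak = 0
--     for c in reversed(s):
--         d = 1 if c == '(' else (-1 if c == ')' else 0)
--         peak = max(0, d + peak)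
--     return peak
-- ===== Notes on version B (the rewrite author's own statement) =====
-- stated objective: simpler
-- what changed: Replaces the forward loop maintaining two accumulators (running balance b and its running maximum mb) by a single-accumulator backward scan using the recurrence peak(c::t) = max(0, delta(c) + peak(t)).
import Mathlib
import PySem

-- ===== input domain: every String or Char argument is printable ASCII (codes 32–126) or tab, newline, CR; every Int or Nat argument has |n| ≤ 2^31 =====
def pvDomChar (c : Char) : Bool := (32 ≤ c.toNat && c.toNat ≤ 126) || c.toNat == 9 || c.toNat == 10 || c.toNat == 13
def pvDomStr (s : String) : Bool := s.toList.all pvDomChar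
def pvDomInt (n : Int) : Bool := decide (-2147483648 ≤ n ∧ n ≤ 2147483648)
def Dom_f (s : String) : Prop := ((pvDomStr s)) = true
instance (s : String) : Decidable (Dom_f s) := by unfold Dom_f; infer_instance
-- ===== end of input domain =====

-- B replaces A's forward loop with two accumulators (balance and its running max)
-- by a backward scan keeping one accumulator (objective: simpler).

-- ===== PORT A =====
-- forward loop over the characters, state (b, mb)
def f (s : String) : Int :=
  (s.toList.foldl
    (fun (st : Int × Int) c =>
      let b := if c = '(' then st.1 + 1 else st.1
      let b := if c = ')' then b - 1 else b
      (b, max st.2 b))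
    (0, 0)).2

-- ===== PORT B =====
def fAltDelta (c : Char) : Int := if c = '(' then 1 else if c = ')' then -1 else 0

-- backward scan: peak ← max 0 (delta c + peak)
def f_alt (s : String) : Int :=
  s.toList.foldr (fun c peak => max 0 (fAltDelta c + peak)) 0

-- ===== PRECONDITION & SPEC =====
def Spec_f (s : String) (out : Int) : Prop := out = f_alt s
instance (s : String) (out : Int) : Decidable (Spec_f s out) := by unfold Spec_f; infer_instance

-- ===== CLAIM (what is proved, stated in full; the proofs are below) =====
def Claim_equal_f : Prop := ∀ (s : String), Dom_f s → Spec_f s (f s)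

-- ===== LEMMAS AND PROOFS =====

def fPeak (l : List Char) : Int := l.foldr (fun c peak => max 0 (fAltDelta c + peak)) 0

theorem fPeak_nonneg (l : List Char) : 0 ≤ fPeak l := by
  cases l with
  | nil => simp [fPeak]
  | cons c t => simp [fPeak]

theorem f_fold_inv (l : List Char) (b mb : Int) :
    (l.foldl
      (fun (st : Int × Int) c =>
        let b := if c = '(' then st.1 + 1 else st.1
        let b := if c = ')' then b - 1 else b
        (b, max st.2 b))
      (b, max mb b)).2 = max mb (b + fPeak l) := by
  induction l generalizing b mb with
  | nil => simp [fPeak]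
  | cons c t ih =>
    simp only [List.foldl_cons, fPeak, List.foldr_cons]
    rw [ih (b := (if c = ')' then (if c = '(' then b + 1 else b) - 1
        else (if c = '(' then b + 1 else b))) (mb := max mb b)]
    simp only [fPeak, fAltDelta]
    have := fPeak_nonneg t
    simp only [fPeak, fAltDelta] at this ⊢
    generalize hg : List.foldr (fun c peak => max 0 ((if c = '(' then 1 else if c = ')' then -1 else 0) + peak)) 0 t = P at this ⊢
    clear hg
    simp only [max_def]
    split_ifs <;> first | omega | simp_all

-- ===== VERDICT (by name: the statement is the Claim_ definition above) =====
theorem f_spec : Claim_equal_f := by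
  intro s _
  unfold Spec_f f f_alt
  have h := f_fold_inv s.toList 0 0
  simp only [show max (0:Int) 0 = 0 from rfl] at h
  rw [h]
  have := fPeak_nonneg s.toList
  simp only [fPeak] at this ⊢
  omega
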